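-- pv_equiv track=rewrite | github.com/seulgi-mun/Algorithm | Python/Programmers/콜라 문제.py | solution
-- ===== SOURCE A (Python) =====
-- def solution(a, b, n):
--     answer = 0
--
--     while True:
--         if n < a:
--             break
--
--         tmp = n % a
--         n = (n // a) * b
--         answer += n
--         n += tmp
--
--     return answer
-- ===== SOURCE B (Python) =====
-- def solution(a, b, n):
--     # Closed form: each exchange converts a empties into b cokes, netting a
--     # loss of a-b bottles, so there are (n-b)//(a-b) exchanges in total.
--     if n < a:
--         return 0
--     return (n - b) // (a - b) * b
-- ===== Notes on version B (the rewrite author's own statement) =====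
-- stated objective: simpler
-- what changed: Replaces the exchange-simulation while-loop with the O(1) closed form (n-b)//(a-b)*b (guarded by n<a -> 0), since each exchange nets a loss of a-b bottles.
-- outside the precondition, e.g. on solution(3, -2, 6): A returns -4, B returns -2; on solution(0, 0, 5): A raises ZeroDivisionError, B raises ZeroDivisionError; on solution(2, 3, 5): A does not finish within the time limit, B returns -6
import Mathlib
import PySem

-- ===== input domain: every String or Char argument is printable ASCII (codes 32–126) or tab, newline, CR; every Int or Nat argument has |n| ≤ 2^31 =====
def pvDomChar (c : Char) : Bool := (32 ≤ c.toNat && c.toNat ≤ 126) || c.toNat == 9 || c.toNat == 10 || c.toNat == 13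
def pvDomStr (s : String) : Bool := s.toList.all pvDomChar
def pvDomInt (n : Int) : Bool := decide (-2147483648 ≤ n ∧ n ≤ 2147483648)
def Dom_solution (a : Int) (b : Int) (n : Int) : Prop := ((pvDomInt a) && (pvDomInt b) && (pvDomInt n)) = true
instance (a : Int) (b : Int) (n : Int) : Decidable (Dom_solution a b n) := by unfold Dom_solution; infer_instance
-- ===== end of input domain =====

-- B replaces A's exchange-simulation loop with the closed form (n-b)//(a-b)*b (simpler, O(1)).

-- ===== PORT A =====
-- A's 'while True' loop, with a fuel guard that only makes the recursion total:
-- inside Pre_solution the loop runs at most n.toNat further steps from state n.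
def solutionGo (fuel : Nat) (a b n answer : Int) : Int :=
  match fuel with
  | 0 => answer
  | fuel + 1 =>
    if n < a then answer
    else
      let tmp := PySem.Int.mod n a
      let n1 := PySem.Int.floordiv n a * b
      let answer1 := answer + n1
      solutionGo fuel a b (n1 + tmp) answer1

def solution (a : Int) (b : Int) (n : Int) : Int :=
  solutionGo (n.toNat + 1) a b n 0

-- ===== PORT B =====
def solution_alt (a : Int) (b : Int) (n : Int) : Int :=
  if n < a then 0
  else PySem.Int.floordiv (n - b) (a - b) * b

-- ===== PRECONDITION & SPEC =====
-- Pre_ restricts to the natural domain of the puzzle whenever an exchange happens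
-- (n ≥ a): receiving 0 ≤ b < a cokes per exchange. Outside it A diverges (b ≥ a),
-- raises ZeroDivisionError (a = 0 ≤ n), or (b < 0, a meaningless negative payout)
-- returns a value outside the task's natural domain.
def Pre_solution (a : Int) (b : Int) (n : Int) : Prop := n < a ∨ (0 ≤ b ∧ b < a)
instance (a : Int) (b : Int) (n : Int) : Decidable (Pre_solution a b n) := by unfold Pre_solution; infer_instance

def pvWitness_solution : Int × Int × Int := (3, 1, 20)

def Spec_solution (a : Int) (b : Int) (n : Int) (out : Int) : Prop := out = solution_alt a b n
instance (a : Int) (b : Int) (n : Int) (out : Int) : Decidable (Spec_solution a b n out) := by unfold Spec_solution; infer_instance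

-- ===== CLAIM (what is proved, stated in full; the proofs are below) =====
def Claim_equal_solution : Prop := ∀ (a : Int) (b : Int) (n : Int), Dom_solution a b n → Pre_solution a b n → Spec_solution a b n (solution a b n)

-- ===== LEMMAS AND PROOFS =====

-- Loop invariant: with enough fuel, the loop adds exactly B's closed form to answer.
theorem solutionGo_eq (b a : Int) (hb : 0 ≤ b) (hba : b < a) :
    ∀ (fuel : Nat) (n answer : Int), n.toNat < fuel →
      solutionGo fuel a b n answer = answer + solution_alt a b n := by
  intro fuel
  induction fuel with
  | zero => intro n answer h; omega
  | succ fuel ih =>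
    intro n answer h
    by_cases hna : n < a
    · simp [solutionGo, solution_alt, hna]
    · rw [not_lt] at hna
      have ha : 0 < a := by omega
      have hd : 0 < a - b := by omega
      rw [solutionGo]
      simp only [if_neg (not_lt.mpr hna)]
      rw [PySem.Int.floordiv_eq_ediv_of_pos ha, PySem.Int.mod_eq_emod_of_pos ha]
      set q := n / a with hq
      set r := n % a with hr
      have hdm : a * q + r = n := Int.mul_ediv_add_emod n a
      have hr0 : 0 ≤ r := Int.emod_nonneg n (by omega)
      have hq1 : 1 ≤ q := by
        rw [hq, Int.le_ediv_iff_mul_le ha]; omega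
      have hlt : q * b + r < n := by nlinarith
      have hfuel : (q * b + r).toNat < fuel := by
        generalize q * b + r = m at hlt
        omega
      rw [ih (q * b + r) (answer + q * b) hfuel]
      -- closed-form step: (n - b)/(a - b) = (q*b + r - b)/(a - b) + q
      have hsplit : (n - b) / (a - b) = (q * b + r - b) / (a - b) + q := by
        have : n - b = (q * b + r - b) + q * (a - b) := by linear_combination -hdm
        rw [this, Int.add_mul_ediv_right _ _ (by omega : a - b ≠ 0)]
      have hAlt : solution_alt a b n = ((q * b + r - b) / (a - b) + q) * b := by
        simp [solution_alt, not_lt.mpr hna, PySem.Int.floordiv_eq_ediv_of_pos hd, hsplit]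
      rw [hAlt]
      by_cases hn1 : q * b + r < a
      · have hz : (q * b + r - b) / (a - b) = 0 := by
          apply Int.ediv_eq_zero_of_lt <;> nlinarith
        simp [solution_alt, hn1, hz]
      · have : solution_alt a b (q * b + r) = (q * b + r - b) / (a - b) * b := by
          simp [solution_alt, hn1, PySem.Int.floordiv_eq_ediv_of_pos hd]
        rw [this]; ring

-- ===== VERDICT (by name: the statement is the Claim_ definition above) =====
theorem solution_spec : Claim_equal_solution := by
  intro a b n _ hpre
  unfold Spec_solution solution
  rcases hpre with h | ⟨hb, hba⟩
  · simp [solutionGo, solution_alt, h]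
  · exact (solutionGo_eq b a hb hba (n.toNat + 1) n 0 (by omega)).trans (by ring_nf)
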